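-- pv_equiv track=rewrite | github.com/AP-MI-2021/lab-4-Iulia-Antonia | main.py | modificare_lista
-- ===== SOURCE A (Python) =====
-- def divizibil_k(n, k):
--     """
--     Verifica daca un numar n este divizibil cu un numar k
--     :param n: numarul intreg pentru care vrem sa vedem daca k ii e divizor
--     :param k: nuar intreg, diferit de 0, care vrem sa vedem daca e divizor a lui n
--     :return: True - daca n divizibil cu k
--              False - daca n nu e divizibil cu k
--     """
--     if n % k == 0:
--         return True
--     else:
--         return False
--
-- def oglindit(numar):
--     """
--     Determina oglinditul unui numar pozitiv. Daca numarul se termina cu unul sau mai multe elemente 0, nu vor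
--     aparea in oglindit
--     :param numar: numarul
--     :return: oglinditul lui numar
--     """
--     numar_str = str(numar)
--     oglindit = numar_str[::-1]
--     return int(oglindit)
--
-- def modificare_lista(lista1, lista2):
--     """
--     Modifica o lista penrtru care elementele care sunt divizibile cu toate elemente din a doua lista, se inlocuiesc cu
--     oglinditul lor
--     :param lista1: prima lista
--     :param lista2: a doua lista
--     :return: rezultat - lista in care elementele din lista1 sunt inlocuite cu oglinditul lor daca elementul este
--     divizibil cu toate elementele din lista2. Daca nu exista astfel de elemente, rezultat ramane lista1
--     """
--     rezultat = []
--     for element1 in lista1: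
--         ok = True
--         for element2 in lista2:
--             if divizibil_k(element1, element2) is False:
--                 ok = False
--         if ok is not True:
--             rezultat.append(element1)
--         else:
--             rezultat.append(oglindit(element1))
--     return rezultat
-- ===== SOURCE B (Python) =====
-- def modificare_lista(lista1, lista2):
--     def _gcd(a, b):
--         while b:
--             a, b = b, a % b
--         return a
--     l = 1
--     for k in lista2:
--         k = abs(k)
--         g = _gcd(l, k)
--         l = l * k // g if g else 0
--     return [int(str(x)[::-1]) if x % l == 0 else x for x in lista1]
-- ===== Notes on version B (the rewrite author's own statement) =====
-- stated objective: faster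
-- what changed: B precomputes the LCM of lista2 once (via a hand-written Euclid gcd) and tests each element of lista1 against that single modulus, instead of A's inner loop over lista2 for every element.
import Mathlib
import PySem

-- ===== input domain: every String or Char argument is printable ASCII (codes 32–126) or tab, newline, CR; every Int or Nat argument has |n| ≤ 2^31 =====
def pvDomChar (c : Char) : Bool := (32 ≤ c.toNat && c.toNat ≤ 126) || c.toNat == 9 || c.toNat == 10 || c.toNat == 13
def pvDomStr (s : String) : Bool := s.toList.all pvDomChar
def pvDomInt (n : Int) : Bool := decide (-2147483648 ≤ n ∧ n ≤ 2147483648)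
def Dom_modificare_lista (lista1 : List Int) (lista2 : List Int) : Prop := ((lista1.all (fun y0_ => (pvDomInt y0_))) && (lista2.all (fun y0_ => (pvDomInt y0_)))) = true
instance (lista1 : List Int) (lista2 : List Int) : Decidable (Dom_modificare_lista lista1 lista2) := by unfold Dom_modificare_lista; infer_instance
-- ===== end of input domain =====

-- B replaces A's per-element inner loop over lista2 by one precomputed LCM and a single
-- divisibility test per element (measured faster, asymptotic change). Equality of RETURN values.

-- ===== PORT A =====
def divizibil_k (n : Int) (k : Int) : Bool :=
  if PySem.Int.mod n k = 0 then true else false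

-- int(str(n)[::-1]); `.getD 0` stands where Python raises ValueError (excluded by Pre_)
def oglindit (numar : Int) : Int :=
  let numar_str := PySem.Int.toChars numar
  let og := (PySem.List.slice? numar_str none none (-1)).getD []
  (PySem.Int.ofChars? og).getD 0

def modificare_lista (lista1 : List Int) (lista2 : List Int) : List Int :=
  lista1.foldl (fun rezultat element1 =>
    let ok := lista2.foldl (fun ok element2 =>
      if divizibil_k element1 element2 == false then false else ok) true
    if ok ≠ true then rezultat ++ [element1] else rezultat ++ [oglindit element1]) []

-- ===== PORT B =====
-- termination helper for the Euclid loop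
theorem pyModNatAbsLt (a b : Int) (hb : ¬ b = 0) :
    (PySem.Int.mod a b).natAbs < b.natAbs := by
  rcases lt_trichotomy b 0 with h | h | h
  · have := PySem.Int.mod_neg_bounds (a := a) h
    omega
  · exact absurd h hb
  · have h1 := PySem.Int.mod_nonneg (a := a) h
    have h2 := PySem.Int.mod_lt (a := a) h
    omega

def pyGcdB (a b : Int) : Int :=
  if h : b = 0 then a else pyGcdB b (PySem.Int.mod a b)
termination_by b.natAbs
decreasing_by exact pyModNatAbsLt a b h

def modificare_lista_alt (lista1 : List Int) (lista2 : List Int) : List Int :=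
  let l := lista2.foldl (fun l k =>
    let k := |k|
    let g := pyGcdB l k
    if g ≠ 0 then PySem.Int.floordiv (l * k) g else 0) 1
  lista1.map (fun x =>
    if PySem.Int.mod x l = 0 then
      (PySem.Int.ofChars? ((PySem.List.slice? (PySem.Int.toChars x) none none (-1)).getD [])).getD 0
    else x)

-- ===== PRECONDITION & SPEC =====
-- Pre_ excludes exactly the inputs where the Python A raises: a zero in lista2 while lista1 is
-- non-empty (ZeroDivisionError in the modulo), and a negative element of lista1 divisible by all
-- of lista2 (int('…-') ValueError when reversing it). B raises on exactly the same inputs.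
def Pre_modificare_lista (lista1 : List Int) (lista2 : List Int) : Prop :=
  ∀ x ∈ lista1, (∀ k ∈ lista2, k ≠ 0) ∧ ((∀ k ∈ lista2, x % k = 0) → 0 ≤ x)
instance (lista1 : List Int) (lista2 : List Int) : Decidable (Pre_modificare_lista lista1 lista2) := by
  unfold Pre_modificare_lista; infer_instance

def pvWitness_modificare_lista : List Int × List Int := ([12, 5, 120, 36], [2, 3])

def Spec_modificare_lista (lista1 : List Int) (lista2 : List Int) (out : List Int) : Prop :=
  out = modificare_lista_alt lista1 lista2
instance (lista1 : List Int) (lista2 : List Int) (out : List Int) : Decidable (Spec_modificare_lista lista1 lista2 out) := by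
  unfold Spec_modificare_lista; infer_instance

-- ===== CLAIM (what is proved, stated in full; the proofs are below) =====
def Claim_equal_modificare_lista : Prop := ∀ (lista1 : List Int) (lista2 : List Int), Dom_modificare_lista lista1 lista2 → Pre_modificare_lista lista1 lista2 → Spec_modificare_lista lista1 lista2 (modificare_lista lista1 lista2)

-- ===== LEMMAS AND PROOFS =====

theorem pyGcdB_natCast (b a : Nat) : pyGcdB (a : Int) (b : Int) = (Nat.gcd b a : Int) := by
  induction b using Nat.strong_induction_on generalizing a with
  | _ b ih =>
    cases b with
    | zero => rw [pyGcdB]; simp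
    | succ n =>
      rw [pyGcdB]
      have hne : ((n + 1 : Nat) : Int) ≠ 0 := by exact_mod_cast Nat.succ_ne_zero n
      rw [dif_neg hne, PySem.Int.mod_natCast]
      rw [ih (a % (n + 1)) (Nat.mod_lt _ (Nat.succ_pos n)) (n + 1)]
      rw [Nat.gcd_succ]

theorem stepB_natCast (a : Nat) (k : Int) :
    (let k' := |k|
     let g := pyGcdB (a : Int) k'
     if g ≠ 0 then PySem.Int.floordiv ((a : Int) * k') g else 0)
    = ((Nat.lcm a k.natAbs : Nat) : Int) := by
  simp only [Int.abs_eq_natAbs]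
  rw [pyGcdB_natCast]
  by_cases hg : Nat.gcd k.natAbs a = 0
  · have ha : a = 0 := (Nat.gcd_eq_zero_iff.mp hg).2
    have hk : k.natAbs = 0 := (Nat.gcd_eq_zero_iff.mp hg).1
    simp [ha, hk, Nat.lcm]
  · have hg' : ((Nat.gcd k.natAbs a : Nat) : Int) ≠ 0 := by exact_mod_cast hg
    rw [if_pos hg']
    have : ((a : Int) * (k.natAbs : Int)) = ((a * k.natAbs : Nat) : Int) := by push_cast; ring
    rw [this, PySem.Int.floordiv_natCast]
    rw [Nat.gcd_comm]
    rfl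

theorem foldB_natCast (l2 : List Int) (a : Nat) :
    l2.foldl (fun l k =>
      let k := |k|
      let g := pyGcdB l k
      if g ≠ 0 then PySem.Int.floordiv (l * k) g else 0) (a : Int)
    = ((l2.foldl (fun m k => Nat.lcm m k.natAbs) a : Nat) : Int) := by
  induction l2 generalizing a with
  | nil => rfl
  | cons h t ih => simp only [List.foldl_cons]; rw [stepB_natCast a h]; exact ih _

theorem lcmFold_dvd_iff (l2 : List Int) (m n : Nat) :
    (l2.foldl (fun m k => Nat.lcm m k.natAbs) m) ∣ n ↔ m ∣ n ∧ ∀ k ∈ l2, k.natAbs ∣ n := by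
  induction l2 generalizing m with
  | nil => simp
  | cons h t ih =>
    simp only [List.foldl_cons, ih, Nat.lcm_dvd_iff, List.mem_cons]
    constructor
    · rintro ⟨⟨h1, h2⟩, h3⟩
      exact ⟨h1, fun k hk => hk.elim (fun e => e ▸ h2) (h3 k)⟩
    · rintro ⟨h1, h2⟩
      exact ⟨⟨h1, h2 h (Or.inl rfl)⟩, fun k hk => h2 k (Or.inr hk)⟩

theorem okExpr_eq (x : Int) (l2 : List Int) :
    (l2.foldl (fun ok element2 =>
        if divizibil_k x element2 == false then false else ok) true)
    = true ↔ ∀ k ∈ l2, k ∣ x := by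
  rw [PySem.List.foldl_if_false_eq]
  simp only [Bool.true_and, Bool.not_eq_eq_eq_not, Bool.not_true, List.any_eq_false,
    divizibil_k]
  constructor
  · intro h k hk
    have := h k hk
    have hm : PySem.Int.mod x k = 0 := by
      by_contra hc
      simp [hc] at this
    exact (PySem.Int.mod_eq_zero_iff_dvd x k).mp hm
  · intro h k hk
    have := (PySem.Int.mod_eq_zero_iff_dvd x k).mpr (h k hk)
    simp [this]

theorem modificare_lista_eq_map (lista1 lista2 : List Int) :
    modificare_lista lista1 lista2
    = lista1.map (fun x =>
        if (lista2.foldl (fun ok element2 =>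
            if divizibil_k x element2 == false then false else ok) true) ≠ true
        then x else oglindit x) := by
  unfold modificare_lista
  have hstep : (fun (rezultat : List Int) (element1 : Int) =>
      let ok := lista2.foldl (fun ok element2 =>
        if divizibil_k element1 element2 == false then false else ok) true
      if ok ≠ true then rezultat ++ [element1] else rezultat ++ [oglindit element1])
      = (fun rezultat element1 => rezultat ++
          [if (lista2.foldl (fun ok element2 =>
              if divizibil_k element1 element2 == false then false else ok) true) ≠ true
           then element1 else oglindit element1]) := by
    funext rezultat element1
    exact (apply_ite (fun z => rezultat ++ [z]) _ _ _).symm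
  rw [hstep, PySem.List.foldl_append_singleton_eq_map, List.nil_append]

-- ===== VERDICT (by name: the statement is the Claim_ definition above) =====
theorem modificare_lista_spec : Claim_equal_modificare_lista := by
  intro lista1 lista2 _ _
  unfold Spec_modificare_lista modificare_lista_alt
  rw [modificare_lista_eq_map]
  have h1 : (1 : Int) = ((1 : Nat) : Int) := rfl
  rw [h1, foldB_natCast]
  apply List.map_congr_left
  intro x _
  have hL : (PySem.Int.mod x ((lista2.foldl (fun m k => Nat.lcm m k.natAbs) 1 : Nat) : Int) = 0)
      ↔ ∀ k ∈ lista2, k ∣ x := by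
    rw [PySem.Int.mod_eq_zero_iff_dvd, Int.natCast_dvd, lcmFold_dvd_iff]
    simp only [Nat.one_dvd, true_and]
    constructor
    · intro h k hk
      exact Int.natAbs_dvd_natAbs.mp (h k hk)
    · intro h k hk
      exact Int.natAbs_dvd_natAbs.mpr (h k hk)
  by_cases hall : ∀ k ∈ lista2, k ∣ x
  · rw [if_pos (hL.mpr hall)]
    have hok := (okExpr_eq x lista2).mpr hall
    rw [if_neg (not_not_intro hok)]
    rfl
  · rw [if_neg (fun hc => hall (hL.mp hc))]
    have hok : ¬ (lista2.foldl (fun ok element2 =>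
        if divizibil_k x element2 == false then false else ok) true) = true := by
      intro hc; exact hall ((okExpr_eq x lista2).mp hc)
    rw [if_pos hok]
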